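-- pv_equiv track=rewrite | github.com/phuongtd91/uec | gen_traffic/from_sider.py | find_available_slots
-- ===== SOURCE A (Python) =====
-- def find_available_slots(occupied, total_slots, size):
--     """
--     Find all available slot indices that can accommodate a lightpath of given size
--
--     Parameters:
--     -----------
--     occupied : list
--         List of tuples (end_time, start_slot, size) representing occupied slots
--     total_slots : int
--         Total number of slots in the link
--     size : int
--         Size of the lightpath to place
--
--     Returns:
--     --------
--     list
--         List of available starting slot indices
--     """
--     # Mark all slots that are currently occupied
--     occupied_ranges = []
--     for _, start, sz in occupied:
--         occupied_ranges.append((start, start + sz - 1))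
--
--     # Sort by start position
--     occupied_ranges.sort()
--
--     # Find all available slots
--     available = []
--     last_end = -1
--
--     for start, end in occupied_ranges:
--         # Check if there's space before this range
--         if start - last_end - 1 >= size:
--             # Add all possible starting positions in this gap
--             for pos in range(last_end + 1, start - size + 1):
--                 available.append(pos)
--         last_end = max(last_end, end)
--
--     # Check space after the last occupied range
--     if total_slots - last_end - 1 >= size:
--         for pos in range(last_end + 1, total_slots - size + 1):
--             available.append(pos)
--
--     return available
-- ===== SOURCE B (Python) =====
-- def find_available_slots(occupied, total_slots, size):
--     """Selection-based rewrite: no sort and no gap-size guard. The occupied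
--     ranges sit in an unordered pool; we repeatedly extract the minimum range
--     from the pool and emit the (possibly empty) run of fitting start positions
--     below it in one arithmetic range; an undersized gap contributes nothing
--     because its range is empty."""
--     pool = [(s, s + z - 1) for _, s, z in occupied]
--     out = []
--     last_end = -1
--     while pool:
--         m = min(pool)
--         pool.remove(m)
--         out.extend(range(last_end + 1, m[0] - size + 1))
--         last_end = max(last_end, m[1])
--     out.extend(range(last_end + 1, total_slots - size + 1))
--     return out
-- ===== Notes on version B (the rewrite author's own statement) =====
-- stated objective: alternative
-- what changed: A sorts the occupied ranges and then sweeps the sorted list with an explicit gap-size test and an inner per-position append loop; B never sorts: it keeps the ranges in an unordered mutable pool, repeatedly extracts the minimum range (selection-style min+remove), and emits each gap as one arithmetic range with no guard (an undersized gap yields an empty range).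
import Mathlib
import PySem

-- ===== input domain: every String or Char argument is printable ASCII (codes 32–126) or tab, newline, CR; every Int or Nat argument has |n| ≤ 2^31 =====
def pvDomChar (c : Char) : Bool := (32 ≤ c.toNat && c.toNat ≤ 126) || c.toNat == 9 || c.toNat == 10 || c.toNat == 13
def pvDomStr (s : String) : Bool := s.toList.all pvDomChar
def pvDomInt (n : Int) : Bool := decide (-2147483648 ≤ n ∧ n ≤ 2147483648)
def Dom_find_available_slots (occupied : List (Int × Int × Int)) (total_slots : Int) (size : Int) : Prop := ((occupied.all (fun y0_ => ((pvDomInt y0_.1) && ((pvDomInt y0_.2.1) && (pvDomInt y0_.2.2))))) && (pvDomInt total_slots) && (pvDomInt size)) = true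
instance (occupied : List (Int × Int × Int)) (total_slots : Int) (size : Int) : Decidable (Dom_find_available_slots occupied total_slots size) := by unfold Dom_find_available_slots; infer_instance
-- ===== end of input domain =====

-- B drops A's sort-then-sweep: it keeps the occupied ranges in an unordered mutable pool,
-- repeatedly extracts the minimum range (min + remove), and emits each gap as one
-- arithmetic range with no gap-size guard; objective: alternative.

-- ===== PORT A =====
def find_available_slots (occupied : List (Int × Int × Int)) (total_slots : Int) (size : Int) : List Int :=
  -- occupied_ranges = []; for _, start, sz in occupied: occupied_ranges.append((start, start+sz-1))
  let occupied_ranges : List (Int × Int) :=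
    occupied.foldl (fun acc t => acc ++ [(t.2.1, t.2.1 + t.2.2 - 1)]) []
  -- occupied_ranges.sort()  (Python tuple order = lexicographic on the two components)
  let occupied_ranges := PySem.List.sorted2 occupied_ranges Prod.fst Prod.snd
  -- available = []; last_end = -1; for start, end in occupied_ranges: …
  let st : List Int × Int :=
    occupied_ranges.foldl
      (fun (st : List Int × Int) (r : Int × Int) =>
        let available :=
          if r.1 - st.2 - 1 ≥ size then
            (PySem.List.pyRange (st.2 + 1) (r.1 - size + 1) 1).foldl (fun acc pos => acc ++ [pos]) st.1
          else st.1
        (available, max st.2 r.2))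
      ([], -1)
  -- if total_slots - last_end - 1 >= size: for pos in range(last_end+1, total_slots-size+1): available.append(pos)
  if total_slots - st.2 - 1 ≥ size then
    (PySem.List.pyRange (st.2 + 1) (total_slots - size + 1) 1).foldl (fun acc pos => acc ++ [pos]) st.1
  else st.1

-- ===== PORT B =====
-- Python's '<' on int pairs: lexicographic (exactly the comparison min(pool) uses).
def pvLt (a b : Int × Int) : Bool := decide (a.1 < b.1) || (!decide (b.1 < a.1) && decide (a.2 < b.2))

-- min(pool) as the foldl PySem.List.min2? performs (named so the lemmas can talk about it).
def pvMinStep (acc : Option (Int × Int)) (x : Int × Int) : Option (Int × Int) :=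
  match acc with
  | none => some x
  | some m => if pvLt x m then some x else some m

lemma pvMin2_eq (l : List (Int × Int)) :
    PySem.List.min2? l Prod.fst Prod.snd = l.foldl pvMinStep none := by
  unfold PySem.List.min2?
  congr 1
  funext acc x
  cases acc <;> rfl

lemma pvMinFold_mem : ∀ (l : List (Int × Int)) (m₀ m : Int × Int),
    l.foldl pvMinStep (some m₀) = some m → m = m₀ ∨ m ∈ l := by
  intro l
  induction l with
  | nil => intro m₀ m h; left; exact (Option.some_inj.mp h).symm
  | cons x t ih =>
      intro m₀ m h
      simp only [List.foldl_cons] at h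
      by_cases hx : pvLt x m₀
      · simp only [pvMinStep, hx, if_pos] at h
        rcases ih x m h with h1 | h1
        · right; simp [h1]
        · right; simp [h1]
      · simp only [pvMinStep, hx] at h
        rcases ih m₀ m h with h1 | h1
        · left; exact h1
        · right; simp [h1]

-- m = min(pool) is an element of pool (the port's recursion terminates by removing it).
lemma pvMin2_mem (l : List (Int × Int)) (m : Int × Int)
    (h : PySem.List.min2? l Prod.fst Prod.snd = some m) : m ∈ l := by
  rw [pvMin2_eq] at h
  cases l with
  | nil => cases h
  | cons a t =>
      simp only [List.foldl_cons, pvMinStep] at h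
      rcases pvMinFold_mem t a m h with h1 | h1
      · simp [h1]
      · simp [h1]

-- while pool: m = min(pool); pool.remove(m); out.extend(range(last_end+1, m[0]-size+1)); last_end = max(last_end, m[1])
def pvBLoop (size : Int) (pool : List (Int × Int)) (out : List Int) (last_end : Int) : List Int × Int :=
  match hp : PySem.List.min2? pool Prod.fst Prod.snd with
  | none => (out, last_end)
  | some m =>
      pvBLoop size ((PySem.List.remove? pool m).getD [])
        (out ++ PySem.List.pyRange (last_end + 1) (m.1 - size + 1) 1) (max last_end m.2)
termination_by pool.length
decreasing_by
  have hmem : m ∈ pool := pvMin2_mem pool m hp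
  rw [PySem.List.remove?_eq_some_erase pool m hmem, Option.getD_some]
  have h1 := List.length_erase_of_mem hmem
  have h2 := List.length_pos_of_mem hmem
  omega

def find_available_slots_alt (occupied : List (Int × Int × Int)) (total_slots : Int) (size : Int) : List Int :=
  -- pool = [(s, s + z - 1) for _, s, z in occupied]
  let pool := occupied.map (fun t => (t.2.1, t.2.1 + t.2.2 - 1))
  -- out = []; last_end = -1; while pool: …
  let st := pvBLoop size pool [] (-1)
  -- out.extend(range(last_end + 1, total_slots - size + 1)); return out
  st.1 ++ PySem.List.pyRange (st.2 + 1) (total_slots - size + 1) 1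

-- ===== PRECONDITION & SPEC =====
def Spec_find_available_slots (occupied : List (Int × Int × Int)) (total_slots : Int) (size : Int) (out : List Int) : Prop := out = find_available_slots_alt occupied total_slots size
instance (occupied : List (Int × Int × Int)) (total_slots : Int) (size : Int) (out : List Int) : Decidable (Spec_find_available_slots occupied total_slots size out) := by unfold Spec_find_available_slots; infer_instance

-- ===== CLAIM (what is proved, stated in full; the proofs are below) =====
def Claim_equal_find_available_slots : Prop := ∀ (occupied : List (Int × Int × Int)) (total_slots : Int) (size : Int), Dom_find_available_slots occupied total_slots size → Spec_find_available_slots occupied total_slots size (find_available_slots occupied total_slots size)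

-- ===== LEMMAS AND PROOFS =====

-- Common recursive description of both programs' output: the gap segments, left to right.
def pvGaps (total_slots size : Int) : Int → List (Int × Int) → List Int
  | le, [] => PySem.List.pyRange (le + 1) (total_slots - size + 1) 1
  | le, r :: rest =>
      PySem.List.pyRange (le + 1) (r.1 - size + 1) 1 ++ pvGaps total_slots size (max le r.2) rest

-- When the gap test fails, the corresponding range() is empty, so the guard can be dropped.
lemma pvRange_nil (a b : Int) (h : b ≤ a) : PySem.List.pyRange a b 1 = [] := by
  rw [PySem.List.pyRange_one]
  have : (b - a).toNat = 0 := by omega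
  simp [this]

lemma pvGuard_elim (size a le : Int) (av : List Int) :
    (if a - le - 1 ≥ size then
        (PySem.List.pyRange (le + 1) (a - size + 1) 1).foldl (fun acc pos => acc ++ [pos]) av
      else av)
    = av ++ PySem.List.pyRange (le + 1) (a - size + 1) 1 := by
  rw [PySem.List.foldl_append_singleton]
  split_ifs with h
  · rfl
  · rw [pvRange_nil _ _ (by omega)]; simp

-- A's loop body, with the guard eliminated.
lemma pvA_step (size : Int) :
    (fun (st : List Int × Int) (r : Int × Int) =>
      let available :=
        if r.1 - st.2 - 1 ≥ size then
          (PySem.List.pyRange (st.2 + 1) (r.1 - size + 1) 1).foldl (fun acc pos => acc ++ [pos]) st.1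
        else st.1
      (available, max st.2 r.2))
    = (fun (st : List Int × Int) (r : Int × Int) =>
        (st.1 ++ PySem.List.pyRange (st.2 + 1) (r.1 - size + 1) 1, max st.2 r.2)) := by
  funext st r
  simp only [pvGuard_elim]

-- The guard-free scan plus trailing emission computes the gap segments.
lemma pvA_loop (total_slots size : Int) (l : List (Int × Int)) :
    ∀ (av : List Int) (le : Int),
    (l.foldl (fun (st : List Int × Int) (r : Int × Int) =>
        (st.1 ++ PySem.List.pyRange (st.2 + 1) (r.1 - size + 1) 1, max st.2 r.2)) (av, le)).1
      ++ PySem.List.pyRange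
          ((l.foldl (fun (st : List Int × Int) (r : Int × Int) =>
              (st.1 ++ PySem.List.pyRange (st.2 + 1) (r.1 - size + 1) 1, max st.2 r.2)) (av, le)).2 + 1)
          (total_slots - size + 1) 1
    = av ++ pvGaps total_slots size le l := by
  induction l with
  | nil => intro av le; simp [pvGaps]
  | cons r rest ih =>
      intro av le
      simp only [List.foldl_cons]
      rw [ih (av ++ PySem.List.pyRange (le + 1) (r.1 - size + 1) 1) (max le r.2)]
      simp [pvGaps]

-- A builds the pair list by repeated append; that is the map B takes.
lemma pvPairs (occupied : List (Int × Int × Int)) :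
    occupied.foldl (fun acc t => acc ++ [(t.2.1, t.2.1 + t.2.2 - 1)]) []
      = occupied.map (fun t => (t.2.1, t.2.1 + t.2.2 - 1)) := by
  simpa using PySem.List.foldl_append_singleton_eq_map
    (f := fun t : Int × Int × Int => (t.2.1, t.2.1 + t.2.2 - 1)) (l := occupied) (acc := [])

-- Order facts about the lexicographic comparison.
lemma pvLt_asymm {a b : Int × Int} (h : pvLt a b = true) : pvLt b a = false := by
  simp [pvLt] at *; omega

lemma pvLt_antisymm {a b : Int × Int} (h1 : pvLt a b = false) (h2 : pvLt b a = false) : a = b := by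
  simp [pvLt] at *
  exact Prod.ext (by omega) (by omega)

-- m ≤ x and x < m₀ give m ≤ m₀.
lemma pvTrans1 {x m m₀ : Int × Int} (h1 : pvLt x m = false) (h2 : pvLt x m₀ = true) :
    pvLt m₀ m = false := by
  simp [pvLt] at *; omega

-- m ≤ m₀ and m₀ ≤ x give m ≤ x.
lemma pvTrans2 {x m m₀ : Int × Int} (h1 : pvLt m₀ m = false) (h2 : pvLt x m₀ = false) :
    pvLt x m = false := by
  simp [pvLt] at *; omega

-- x < y and y ≤ z give x ≤ z.
lemma pvTrans3 {x y z : Int × Int} (h1 : pvLt x y = true) (h2 : pvLt z y = false) :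
    pvLt z x = false := by
  simp [pvLt] at *; omega

-- The running minimum of the fold is a lower bound for the start value and everything scanned.
lemma pvMinFold_min : ∀ (l : List (Int × Int)) (m₀ m : Int × Int),
    l.foldl pvMinStep (some m₀) = some m →
    pvLt m₀ m = false ∧ ∀ y ∈ l, pvLt y m = false := by
  intro l
  induction l with
  | nil =>
      intro m₀ m h
      have hm : m = m₀ := (Option.some_inj.mp h).symm
      subst hm
      exact ⟨by simp [pvLt], by simp⟩
  | cons x t ih =>
      intro m₀ m h
      simp only [List.foldl_cons] at h
      by_cases hx : pvLt x m₀
      · simp only [pvMinStep, hx, if_pos] at h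
        rcases ih x m h with ⟨hxm, ht⟩
        refine ⟨pvTrans1 hxm hx, ?_⟩
        intro y hy
        rcases List.mem_cons.mp hy with hy | hy
        · subst hy; exact hxm
        · exact ht y hy
      · simp only [pvMinStep, hx] at h
        rcases ih m₀ m h with ⟨hm0, ht⟩
        refine ⟨hm0, ?_⟩
        intro y hy
        rcases List.mem_cons.mp hy with hy | hy
        · subst hy
          exact pvTrans2 hm0 (by simpa using hx)
        · exact ht y hy

-- min(pool) is a lower bound of the pool.
lemma pvMin2_min (l : List (Int × Int)) (m : Int × Int)
    (h : PySem.List.min2? l Prod.fst Prod.snd = some m) : ∀ y ∈ l, pvLt y m = false := by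
  rw [pvMin2_eq] at h
  cases l with
  | nil => cases h
  | cons a t =>
      simp only [List.foldl_cons, pvMinStep] at h
      rcases pvMinFold_min t a m h with ⟨ha, ht⟩
      intro y hy
      rcases List.mem_cons.mp hy with hy | hy
      · subst hy; exact ha
      · exact ht y hy

lemma pvMin2_none (l : List (Int × Int))
    (h : PySem.List.min2? l Prod.fst Prod.snd = none) : l = [] := by
  rcases l with _ | ⟨a, t⟩
  · rfl
  · exfalso
    rw [pvMin2_eq] at h
    simp only [List.foldl_cons, pvMinStep] at h
    rcases ht : t.foldl pvMinStep (some a) with _ | m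
    · clear h
      induction t generalizing a with
      | nil => cases ht
      | cons x s ih =>
          simp only [List.foldl_cons, pvMinStep] at ht
          by_cases hx : pvLt x a
          · simp only [hx, if_pos] at ht; exact ih x ht
          · simp only [hx] at ht; exact ih a ht
    · rw [ht] at h; cases h

-- sorted() builds the list by insertion; one step of it.
lemma pvInsert_nil (x : Int × Int) : PySem.List.insertBy pvLt x [] = [x] := by
  simp [PySem.List.insertBy]

lemma pvInsert_cons (x y : Int × Int) (ys : List (Int × Int)) :
    PySem.List.insertBy pvLt x (y :: ys)
      = if pvLt x y then x :: y :: ys else y :: PySem.List.insertBy pvLt x ys := by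
  simp [PySem.List.insertBy]

lemma pvSorted2_eq (l : List (Int × Int)) :
    PySem.List.sorted2 l Prod.fst Prod.snd
      = l.foldl (fun acc x => PySem.List.insertBy pvLt x acc) [] := by
  unfold PySem.List.sorted2 pvLt
  rfl

lemma pvInsert_pairwise (x : Int × Int) (ys : List (Int × Int))
    (h : ys.Pairwise (fun a b => pvLt b a = false)) :
    (PySem.List.insertBy pvLt x ys).Pairwise (fun a b => pvLt b a = false) := by
  induction ys with
  | nil => rw [pvInsert_nil]; simp
  | cons y t ih =>
      rcases List.pairwise_cons.mp h with ⟨hy, ht⟩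
      rw [pvInsert_cons]
      split_ifs with hxy
      · refine List.pairwise_cons.mpr ⟨?_, h⟩
        intro z hz
        rcases List.mem_cons.mp hz with hz | hz
        · subst hz; exact pvLt_asymm hxy
        · exact pvTrans3 hxy (hy z hz)
      · refine List.pairwise_cons.mpr ⟨?_, ih ht⟩
        intro z hz
        rcases (PySem.List.mem_insertBy _ _ _ _).mp hz with hz | hz
        · subst hz; simpa using hxy
        · exact hy z hz

lemma pvSortedFold_pairwise : ∀ (l : List (Int × Int)) (acc : List (Int × Int)),
    acc.Pairwise (fun a b => pvLt b a = false) →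
    (l.foldl (fun acc x => PySem.List.insertBy pvLt x acc) acc).Pairwise (fun a b => pvLt b a = false) := by
  intro l
  induction l with
  | nil => intro acc h; exact h
  | cons x t ih =>
      intro acc h
      simp only [List.foldl_cons]
      exact ih _ (pvInsert_pairwise x acc h)

lemma pvSorted2_pairwise (l : List (Int × Int)) :
    (PySem.List.sorted2 l Prod.fst Prod.snd).Pairwise (fun a b => pvLt b a = false) := by
  rw [pvSorted2_eq]
  exact pvSortedFold_pairwise l [] (by simp)

-- KEY: the sorted list begins with min(pool), followed by the sorted rest.
lemma pvSorted2_min (l : List (Int × Int)) (m : Int × Int)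
    (h : PySem.List.min2? l Prod.fst Prod.snd = some m) :
    PySem.List.sorted2 l Prod.fst Prod.snd
      = m :: PySem.List.sorted2 (l.erase m) Prod.fst Prod.snd := by
  have hmem := pvMin2_mem l m h
  have hmin := pvMin2_min l m h
  apply List.Perm.eq_of_pairwise (le := fun a b => pvLt b a = false)
    (fun a b _ _ h1 h2 => pvLt_antisymm h2 h1)
  · exact pvSorted2_pairwise l
  · refine List.pairwise_cons.mpr ⟨?_, pvSorted2_pairwise _⟩
    intro z hz
    have hz' : z ∈ l.erase m :=
      (PySem.List.sorted2_perm (l.erase m) Prod.fst Prod.snd false).mem_iff.mp hz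
    exact hmin z (List.mem_of_mem_erase hz')
  · exact ((PySem.List.sorted2_perm l Prod.fst Prod.snd false).trans
      (List.perm_cons_erase hmem)).trans
      (List.Perm.cons m (PySem.List.sorted2_perm (l.erase m) Prod.fst Prod.snd false).symm)

-- Unfolding the pool loop.
lemma pvBLoop_none (size : Int) (pool : List (Int × Int)) (out : List Int) (le : Int)
    (h : PySem.List.min2? pool Prod.fst Prod.snd = none) :
    pvBLoop size pool out le = (out, le) := by
  rw [pvBLoop.eq_def]
  split
  · rfl
  · rename_i m hm; rw [h] at hm; cases hm

lemma pvBLoop_some (size : Int) (pool : List (Int × Int)) (out : List Int) (le : Int)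
    (m : Int × Int) (h : PySem.List.min2? pool Prod.fst Prod.snd = some m) :
    pvBLoop size pool out le
      = pvBLoop size ((PySem.List.remove? pool m).getD [])
          (out ++ PySem.List.pyRange (le + 1) (m.1 - size + 1) 1) (max le m.2) := by
  rw [pvBLoop.eq_def]
  split
  · rename_i hm; rw [h] at hm; cases hm
  · rename_i m' hm'; rw [h] at hm'; cases hm'; rfl

-- B's pool loop plus the trailing emission computes the gap segments of the sorted pool.
lemma pvB_loop (total_slots size : Int) : ∀ (n : Nat) (pool : List (Int × Int)), pool.length ≤ n →
    ∀ (out : List Int) (le : Int),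
    (pvBLoop size pool out le).1
      ++ PySem.List.pyRange ((pvBLoop size pool out le).2 + 1) (total_slots - size + 1) 1
    = out ++ pvGaps total_slots size le (PySem.List.sorted2 pool Prod.fst Prod.snd) := by
  intro n
  induction n with
  | zero =>
      intro pool hlen out le
      have hp : pool = [] := List.length_eq_zero_iff.mp (Nat.le_zero.mp hlen)
      subst hp
      rw [pvBLoop_none _ _ _ _ (by rw [pvMin2_eq]; rfl), pvSorted2_eq]
      simp [pvGaps]
  | succ n ih =>
      intro pool hlen out le
      cases hmin : PySem.List.min2? pool Prod.fst Prod.snd with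
      | none =>
          have hp := pvMin2_none pool hmin
          subst hp
          rw [pvBLoop_none _ _ _ _ hmin, pvSorted2_eq]
          simp [pvGaps]
      | some m =>
          have hmem := pvMin2_mem pool m hmin
          rw [pvBLoop_some _ _ _ _ _ hmin,
            PySem.List.remove?_eq_some_erase pool m hmem, Option.getD_some]
          have hl : (pool.erase m).length ≤ n := by
            have h1 := List.length_erase_of_mem hmem
            have h2 := List.length_pos_of_mem hmem
            omega
          rw [ih (pool.erase m) hl]
          rw [pvSorted2_min pool m hmin]
          simp [pvGaps]

-- ===== VERDICT (by name: the statement is the Claim_ definition above) =====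
theorem find_available_slots_spec : Claim_equal_find_available_slots := by
  intro occupied total_slots size _
  show find_available_slots occupied total_slots size = find_available_slots_alt occupied total_slots size
  simp only [find_available_slots, find_available_slots_alt]
  rw [pvPairs, pvA_step, pvGuard_elim, pvA_loop]
  rw [pvB_loop total_slots size
    (occupied.map (fun t => (t.2.1, t.2.1 + t.2.2 - 1))).length _ (le_refl _)]
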